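-- pv_equiv track=rewrite | github.com/mayurpatil0906/VirtualCalc_Project | virtualcalc.py | check_button_click
-- ===== SOURCE A (Python) =====
-- def check_button_click(cursor_pos):
--     button_positions = {
--         "Undo": (10, 50, 90, 90),
--         "Redo": (110, 50, 190, 90),
--         "Enter": (210, 50, 290, 90),
--         "Select": (310, 50, 390, 90),
--     }
--     for button, (x1, y1, x2, y2) in button_positions.items():
--         if x1 <= cursor_pos[0] <= x2 and y1 <= cursor_pos[1] <= y2:
--             return button
--     return None
-- ===== SOURCE B (Python) =====
-- def check_button_click(cursor_pos):
--     x, y = cursor_pos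
--     if not (50 <= y <= 90):
--         return None
--     i = (x - 10) // 100
--     if 0 <= i <= 3 and (x - 10) - 100 * i <= 80:
--         return ["Undo", "Redo", "Enter", "Select"][i]
--     return None
-- ===== Notes on version B (the rewrite author's own statement) =====
-- stated objective: simpler
-- what changed: Replaces the dictionary scan over four rectangles with a closed-form arithmetic index: shared vertical band test, then i = (x-10)//100 with an 80-px width check indexing a label list.
import Mathlib
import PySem

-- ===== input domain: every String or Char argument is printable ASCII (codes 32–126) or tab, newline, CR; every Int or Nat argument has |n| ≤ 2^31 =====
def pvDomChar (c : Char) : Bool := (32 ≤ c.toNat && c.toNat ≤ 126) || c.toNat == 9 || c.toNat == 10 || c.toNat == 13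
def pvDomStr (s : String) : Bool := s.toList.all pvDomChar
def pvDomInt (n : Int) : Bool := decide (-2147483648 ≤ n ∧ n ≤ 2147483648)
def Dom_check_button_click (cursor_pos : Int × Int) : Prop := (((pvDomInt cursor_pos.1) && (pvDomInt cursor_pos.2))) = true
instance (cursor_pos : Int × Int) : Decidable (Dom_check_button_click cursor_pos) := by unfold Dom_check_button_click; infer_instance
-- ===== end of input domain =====

-- B replaces A's scan over the four button rectangles by a closed-form arithmetic index (simpler).

-- ===== PORT A =====
-- the for-loop over button_positions.items(): first rectangle containing the cursor wins
def pvFindButton (items : List (String × (Int × Int × Int × Int))) (cursor_pos : Int × Int) : Option String :=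
  match items with
  | [] => none
  | (button, (x1, y1, x2, y2)) :: rest =>
    if x1 ≤ cursor_pos.1 ∧ cursor_pos.1 ≤ x2 ∧ y1 ≤ cursor_pos.2 ∧ cursor_pos.2 ≤ y2 then
      some button
    else pvFindButton rest cursor_pos

def check_button_click (cursor_pos : Int × Int) : Option String :=
  let button_positions : List (String × (Int × Int × Int × Int)) :=
    [("Undo", (10, 50, 90, 90)),
     ("Redo", (110, 50, 190, 90)),
     ("Enter", (210, 50, 290, 90)),
     ("Select", (310, 50, 390, 90))]
  pvFindButton button_positions cursor_pos

-- ===== PORT B =====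
def check_button_click_alt (cursor_pos : Int × Int) : Option String :=
  let x := cursor_pos.1
  let y := cursor_pos.2
  if ¬ (50 ≤ y ∧ y ≤ 90) then none
  else
    let i := PySem.Int.floordiv (x - 10) 100
    if 0 ≤ i ∧ i ≤ 3 ∧ (x - 10) - 100 * i ≤ 80 then
      PySem.List.pyGet? ["Undo", "Redo", "Enter", "Select"] i
    else none

-- ===== PRECONDITION & SPEC =====
def Spec_check_button_click (cursor_pos : Int × Int) (out : Option String) : Prop := out = check_button_click_alt cursor_pos
instance (cursor_pos : Int × Int) (out : Option String) : Decidable (Spec_check_button_click cursor_pos out) := by unfold Spec_check_button_click; infer_instance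

-- ===== CLAIM (what is proved, stated in full; the proofs are below) =====
def Claim_equal_check_button_click : Prop := ∀ (cursor_pos : Int × Int), Dom_check_button_click cursor_pos → Spec_check_button_click cursor_pos (check_button_click cursor_pos)

-- ===== LEMMAS AND PROOFS =====

-- ===== VERDICT (by name: the statement is the Claim_ definition above) =====
theorem check_button_click_spec : Claim_equal_check_button_click := by
  unfold Claim_equal_check_button_click
  rintro ⟨x, y⟩ _
  simp only [Spec_check_button_click, check_button_click, check_button_click_alt, pvFindButton]
  rw [PySem.Int.floordiv_eq_ediv_of_pos (by norm_num : (0:Int) < 100)]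
  split_ifs with h1 h2 h3 h4 h5 h6 h7 h8 h9 h10 <;>
    first
      | rfl
      | (exfalso; omega)
      | (have h0 : (x - 10) / 100 = 0 := by omega
         rw [h0]; decide)
      | (have h0 : (x - 10) / 100 = 1 := by omega
         rw [h0]; decide)
      | (have h0 : (x - 10) / 100 = 2 := by omega
         rw [h0]; decide)
      | (have h0 : (x - 10) / 100 = 3 := by omega
         rw [h0]; decide)
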